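-- pv_equiv track=rewrite | github.com/Mdixit/Hackerrank | algorithms/stock.py | calc_val
-- ===== SOURCE A (Python) =====
-- def calc_val(stock):
--     s_val = 0
--     if(len(stock) == 1):
--         return 0
--     max_val = max(stock)
--     idx = stock.index(max_val)
--     if(idx == len(stock)-1):
--         return ((idx*max_val)-sum(stock[:idx]))
--     s_val = ((idx * max_val)-sum(stock[:idx])) + calc_val(stock[idx+1:])
--     return s_val
-- ===== SOURCE B (Python) =====
-- def calc_val(stock):
--     total = 0
--     best = None
--     for p in reversed(stock):
--         if best is None or p > best:
--             best = p
--         total += best - p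
--     return total
-- ===== Notes on version B (the rewrite author's own statement) =====
-- stated objective: faster
-- what changed: Replaces the recursive find-max/split scheme (max+index+sum rescans on each suffix) with a single right-to-left pass that tracks the running maximum and accumulates max-price.
import Mathlib
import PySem

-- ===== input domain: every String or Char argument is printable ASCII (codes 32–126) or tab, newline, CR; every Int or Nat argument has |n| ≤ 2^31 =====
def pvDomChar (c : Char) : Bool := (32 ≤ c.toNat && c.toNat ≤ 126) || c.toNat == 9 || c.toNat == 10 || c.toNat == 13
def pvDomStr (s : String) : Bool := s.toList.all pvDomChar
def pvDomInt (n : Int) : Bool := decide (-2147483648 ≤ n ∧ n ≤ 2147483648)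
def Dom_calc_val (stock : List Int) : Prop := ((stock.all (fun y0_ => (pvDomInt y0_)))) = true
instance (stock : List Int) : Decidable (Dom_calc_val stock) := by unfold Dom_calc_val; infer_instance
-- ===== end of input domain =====

-- B replaces A's recursive find-max/split scheme with a single right-to-left pass
-- tracking the running maximum (return-value equivalence; neither mutates its argument).

-- ===== PORT A =====
def calc_val (stock : List Int) : Int :=
  if stock.length == 1 then 0
  else
    match PySem.List.max? stock id with
    | none => 0      -- max([]) raises ValueError in Python; outside Pre_
    | some max_val =>
      match h2 : PySem.List.index? stock max_val with
      | none => 0    -- unreachable: max_val ∈ stock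
      | some idx =>
        if idx == stock.length - 1 then
          (idx : Int) * max_val - (PySem.List.slice stock none (some (idx : Int))).sum
        else
          ((idx : Int) * max_val - (PySem.List.slice stock none (some (idx : Int))).sum)
            + calc_val (PySem.List.slice stock (some ((idx : Int) + 1)) none)
termination_by stock.length
decreasing_by
  have hmem : max_val ∈ stock := by
    by_contra hn
    rw [(PySem.List.index?_eq_none_iff _ _).mpr hn] at h2
    simp at h2
  have hne : 0 < stock.length := List.length_pos_iff.mpr (by rintro rfl; exact (List.not_mem_nil hmem))
  have hc : ((idx : Int) + 1) = ((idx + 1 : Nat) : Int) := by push_cast; ring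
  rw [hc, PySem.List.slice_from_natCast, List.length_drop]
  omega

-- ===== PORT B =====
def altStep (s : Option Int × Int) (p : Int) : Option Int × Int :=
  let best := match s.1 with
    | none => p
    | some b => if p > b then p else b
  (some best, s.2 + (best - p))

def calc_val_alt (stock : List Int) : Int :=
  (stock.reverse.foldl altStep (none, 0)).2

-- ===== PRECONDITION & SPEC =====
-- Pre_ excludes only the empty list, on which Python A raises ValueError (max of empty sequence).
def Pre_calc_val (stock : List Int) : Prop := stock ≠ []
instance (stock : List Int) : Decidable (Pre_calc_val stock) := by unfold Pre_calc_val; infer_instance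
def pvWitness_calc_val : List Int := [1, 3, 2]

def Spec_calc_val (stock : List Int) (out : Int) : Prop := out = calc_val_alt stock
instance (stock : List Int) (out : Int) : Decidable (Spec_calc_val stock out) := by unfold Spec_calc_val; infer_instance

-- ===== CLAIM (what is proved, stated in full; the proofs are below) =====
def Claim_equal_calc_val : Prop := ∀ (stock : List Int), Dom_calc_val stock → Pre_calc_val stock → Spec_calc_val stock (calc_val stock)

-- ===== LEMMAS AND PROOFS =====

-- Proof-only view of B's loop state: folding from the right, one constructor at a time.
def gB : List Int → Option Int × Int
  | [] => (none, 0)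
  | x :: xs => altStep (gB xs) x

theorem calc_val_alt_eq_gB (l : List Int) : calc_val_alt l = (gB l).2 := by
  have h : ∀ l : List Int, l.reverse.foldl altStep (none, 0) = gB l := by
    intro l
    induction l with
    | nil => rfl
    | cons x xs ih => simp [List.foldl_append, ih, gB]
  simp [calc_val_alt, h]

-- The first state component is a maximum of the remaining list (or none iff it is empty).
theorem gB_fst (xs : List Int) :
    ((gB xs).1 = none ∧ xs = []) ∨ ∃ b, (gB xs).1 = some b ∧ b ∈ xs ∧ ∀ y ∈ xs, y ≤ b := by
  induction xs with
  | nil => exact Or.inl ⟨rfl, rfl⟩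
  | cons x xs ih =>
    right
    rcases ih with ⟨h1, rfl⟩ | ⟨b, hb, hmem, hmax⟩
    · exact ⟨x, by simp [gB, altStep], by simp, by simp⟩
    · by_cases hlt : x > b
      · refine ⟨x, by simp [gB, altStep, hb, hlt], by simp, ?_⟩
        intro y hy
        rcases List.mem_cons.mp hy with rfl | hy
        · exact le_rfl
        · exact le_trans (hmax y hy) (le_of_lt hlt)
      · refine ⟨b, by simp [gB, altStep, hb, hlt], by simp [hmem], ?_⟩
        intro y hy
        rcases List.mem_cons.mp hy with rfl | hy
        · exact not_lt.mp hlt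
        · exact hmax y hy

-- Main decomposition: with everything before the first maximum strictly below it and
-- everything after at most it, B's value splits exactly as A computes it.
theorem alt_split (pre : List Int) (m : Int) (suf : List Int)
    (hpre : ∀ y ∈ pre, y < m) (hsuf : ∀ y ∈ suf, y ≤ m) :
    calc_val_alt (pre ++ m :: suf) =
      (pre.length : Int) * m - pre.sum + calc_val_alt suf := by
  induction pre with
  | nil =>
    simp only [List.nil_append, calc_val_alt_eq_gB, gB]
    rcases gB_fst suf with ⟨h1, rfl⟩ | ⟨b, hb, hmem, _⟩
    · simp [altStep, gB]
    · have hbm : b ≤ m := hsuf b hmem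
      by_cases hlt : m > b
      · simp [altStep, hb, hlt]
      · have : b = m := le_antisymm hbm (not_lt.mp hlt)
        subst this
        simp [altStep, hb]
  | cons x pre ih =>
    have hx : x < m := hpre x (by simp)
    have ih' := ih (fun y hy => hpre y (by simp [hy]))
    rcases gB_fst (pre ++ m :: suf) with ⟨_, habs⟩ | ⟨b, hb, hmem, hmax⟩
    · exact absurd habs (by simp)
    · have hbm : b ≤ m := by
        rcases List.mem_append.mp hmem with h | h
        · exact le_of_lt (hpre b (by simp [h]))
        · rcases List.mem_cons.mp h with rfl | h
          · exact le_rfl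
          · exact hsuf b h
      have hmb : m ≤ b := hmax m (by simp)
      have hbm' : b = m := le_antisymm hbm hmb
      subst hbm'
      have hxb : ¬ (x > b) := not_lt.mpr (le_of_lt hx)
      simp only [List.cons_append, calc_val_alt_eq_gB, gB, altStep, hb, hxb, if_false] at ih' ⊢
      rw [ih', List.length_cons, List.sum_cons]
      push_cast
      ring

theorem calc_eq (stock : List Int) : calc_val stock = calc_val_alt stock := by
  fun_induction calc_val stock with
  | case1 stock h1 =>
    match stock, h1 with
    | [x], _ => simp [calc_val_alt, altStep]
  | case2 stock h1 hmax =>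
    have : stock = [] := (PySem.List.max?_eq_none_iff _ _).mp hmax
    subst this; rfl
  | case3 stock h1 m hmax idxh =>
    exact absurd ((PySem.List.index?_eq_none_iff _ _).mp idxh) (by simp [PySem.List.max?_mem hmax])
  | case4 stock h1 m hmax idx idxh hlast =>
    obtain ⟨pre, suf, hdec, hlen, hnotin⟩ := (PySem.List.index?_eq_some_iff _ _ _).mp idxh
    have hall : ∀ y ∈ stock, y ≤ m := PySem.List.max?_isMax hmax
    have hpre : ∀ y ∈ pre, y < m := fun y hy =>
      lt_of_le_of_ne (hall y (by simp [hdec, hy])) (fun h => hnotin (h ▸ hy))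
    have hsuf0 : ∀ y ∈ suf, y ≤ m := fun y hy => hall y (by simp [hdec, hy])
    have hsufnil : suf = [] := by
      have hi : idx = stock.length - 1 := by simpa using hlast
      have : stock.length = pre.length + suf.length + 1 := by
        rw [hdec, List.length_append, List.length_cons]; omega
      have : suf.length = 0 := by omega
      exact List.eq_nil_of_length_eq_zero this
    subst hsufnil
    rw [hdec, ← hlen, PySem.List.slice_to_natCast, List.take_left' rfl, alt_split pre m [] hpre hsuf0]
    simp [calc_val_alt]
  | case5 stock h1 m hmax idx idxh hlast ih =>
    obtain ⟨pre, suf, hdec, hlen, hnotin⟩ := (PySem.List.index?_eq_some_iff _ _ _).mp idxh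
    have hall : ∀ y ∈ stock, y ≤ m := PySem.List.max?_isMax hmax
    have hpre : ∀ y ∈ pre, y < m := fun y hy =>
      lt_of_le_of_ne (hall y (by simp [hdec, hy])) (fun h => hnotin (h ▸ hy))
    have hsuf0 : ∀ y ∈ suf, y ≤ m := fun y hy => hall y (by simp [hdec, hy])
    have hcast : ((idx : Int) + 1) = ((idx + 1 : Nat) : Int) := by push_cast; ring
    have hdrop : PySem.List.slice stock (some ((idx : Int) + 1)) none = suf := by
      rw [hcast, PySem.List.slice_from_natCast, hdec,
        show pre ++ m :: suf = (pre ++ [m]) ++ suf by simp,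
        List.drop_left' (by simp [hlen])]
    rw [hdrop] at ih
    rw [hdrop, ih, hdec, ← hlen, PySem.List.slice_to_natCast, List.take_left' rfl,
      alt_split pre m suf hpre hsuf0]

-- ===== VERDICT =====
theorem calc_val_spec : Claim_equal_calc_val := by
  intro stock _ _; exact calc_eq stock
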